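-- pv_equiv track=rewrite | github.com/riyuna/problem-solving | UCPC 2021 perm/D.py | f
-- ===== SOURCE A (Python) =====
-- def f(L):
--     if len(L)==1:
--         return 0
--     if len(L)==2:
--         return 0
--     if len(L)==3:
--         return L[1]
--     L.pop(len(L)-1)
--     L.pop(0)
--     L.sort()
--     L.reverse()
--     sum=0
--     for i in range((len(L)+1)//2):
--         sum += L[i]
--     return sum
-- ===== SOURCE B (Python) =====
-- # Iterative quickselect (middle-element pivot): sum of the largest ceil(m/2)
-- # elements of L[1:-1] without fully sorting.  Note: A mutates L in place
-- # (pops/sorts); B leaves L untouched -- equivalence claimed on the return value only.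
-- def f(L):
--     n = len(L)
--     if n <= 2:
--         return 0
--     xs = L[1:n - 1]
--     k = (len(xs) + 1) // 2
--     acc = 0
--     while True:
--         if k <= 0:
--             return acc
--         if k >= len(xs):
--             return acc + sum(xs)
--         p = xs[len(xs) // 2]
--         hi = [x for x in xs if x > p]
--         if k <= len(hi):
--             xs = hi
--             continue
--         e = xs.count(p)
--         acc += sum(hi)
--         if k <= len(hi) + e:
--             return acc + p * (k - len(hi))
--         acc += p * e
--         k -= len(hi) + e
--         xs = [x for x in xs if x < p]
-- ===== Notes on version B (the rewrite author's own statement) =====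
-- stated objective: alternative
-- what changed: Replaces A's destructive pop/sort/reverse/index-loop with an iterative quickselect (middle-element pivot) that partitions around pivots and sums the top ceil(m/2) elements without fully sorting; B does not mutate L.
import Mathlib
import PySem

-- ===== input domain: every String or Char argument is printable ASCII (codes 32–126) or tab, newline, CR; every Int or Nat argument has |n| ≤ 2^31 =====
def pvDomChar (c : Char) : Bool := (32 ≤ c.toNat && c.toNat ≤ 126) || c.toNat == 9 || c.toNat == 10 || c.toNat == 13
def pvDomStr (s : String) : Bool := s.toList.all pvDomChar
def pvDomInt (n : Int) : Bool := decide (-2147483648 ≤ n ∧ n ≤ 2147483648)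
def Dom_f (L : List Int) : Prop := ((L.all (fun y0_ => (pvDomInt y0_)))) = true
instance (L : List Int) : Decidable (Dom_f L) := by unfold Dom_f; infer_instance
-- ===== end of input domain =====

-- B replaces A's pop/sort/reverse/index-loop with an iterative quickselect (middle-element
-- pivot) summing the largest ceil(m/2) of L[1:-1]; A mutates its argument (pops/sorts), B
-- does not — the equivalence proved here is about the return value only.

-- ===== PORT A =====
def f (L : List Int) : Int :=
  if L.length = 1 then 0
  else if L.length = 2 then 0
  else if L.length = 3 then PySem.List.pyGetD L 1 0
  else
    match PySem.List.pop? L ((L.length : Int) - 1) with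
    | none => 0  -- IndexError (only for L = []); excluded by Pre_f
    | some (_, L1) =>
      match PySem.List.pop? L1 0 with
      | none => 0
      | some (_, L2) =>
        let L3 := (PySem.List.sorted L2 (fun x => x)).reverse
        (PySem.List.pyRange 0 (PySem.Int.floordiv ((L3.length : Int) + 1) 2) 1).foldl
          (fun s i => s + PySem.List.pyGetD L3 i 0) 0


-- ===== PORT B =====
-- pivot_mem is cited by topkLoop's decreasing_by (termination of the quickselect loop)
lemma pivot_mem (xs : List Int) (h : xs ≠ []) :
    PySem.List.pyGetD xs (PySem.Int.floordiv (xs.length : Int) 2) 0 ∈ xs := by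
  have h2 : PySem.Int.floordiv (xs.length : Int) 2 = ((xs.length / 2 : Nat) : Int) := by
    rw [PySem.Int.floordiv_eq_ediv_of_pos (by omega)]; exact_mod_cast rfl
  rw [h2, PySem.List.pyGetD_natCast]
  have hlt : xs.length / 2 < xs.length := by
    have : 0 < xs.length := List.length_pos_iff.mpr h
    omega
  rw [List.getD_eq_getElem _ _ hlt]
  exact List.getElem_mem hlt

def topkLoop (xs : List Int) (k acc : Int) : Int :=
  if k ≤ 0 then acc
  else if (xs.length : Int) ≤ k then acc + xs.sum
  else
    let p := PySem.List.pyGetD xs (PySem.Int.floordiv (xs.length : Int) 2) 0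
    let hi := xs.filter (fun x => p < x)
    if k ≤ (hi.length : Int) then topkLoop hi k acc
    else
      let e : Int := xs.count p
      if k ≤ (hi.length : Int) + e then acc + hi.sum + p * (k - hi.length)
      else topkLoop (xs.filter (fun x => x < p)) (k - (hi.length : Int) - e) (acc + hi.sum + p * e)
termination_by xs.length
decreasing_by
  all_goals
    have hne : xs ≠ [] := by
      intro hx; subst hx; simp at *; omega
    simp only [List.length_unattach]
    conv_rhs => rw [← List.length_attach (l := xs)]
    exact List.length_filter_lt_length_iff_exists.mpr
      ⟨⟨_, pivot_mem xs hne⟩, List.mem_attach _ _, by simp⟩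

def f_alt (L : List Int) : Int :=
  let n : Int := L.length
  if n ≤ 2 then 0
  else
    let xs := PySem.List.slice L (some 1) (some (n - 1))
    let k := PySem.Int.floordiv ((xs.length : Int) + 1) 2
    topkLoop xs k 0

-- ===== PRECONDITION & SPEC =====
-- Pre_f excludes only the empty list, on which A raises IndexError (pop from empty list).
def Pre_f (L : List Int) : Prop := L ≠ []
instance (L : List Int) : Decidable (Pre_f L) := by unfold Pre_f; infer_instance

def pvWitness_f : List Int := [5, 1, 4, 2, 3]

def Spec_f (L : List Int) (out : Int) : Prop := out = f_alt L
instance (L : List Int) (out : Int) : Decidable (Spec_f L out) := by unfold Spec_f; infer_instance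

-- ===== CLAIM (what is proved, stated in full; the proofs are below) =====
def Claim_equal_f : Prop := ∀ (L : List Int), Dom_f L → Pre_f L → Spec_f L (f L)

-- ===== LEMMAS AND PROOFS =====

-- the descending sort both programs' values are measured against
def sdesc (xs : List Int) : List Int := (PySem.List.sorted xs (fun x => x)).reverse

lemma sdesc_perm (xs : List Int) : (sdesc xs).Perm xs := by
  unfold sdesc
  exact (List.reverse_perm _).trans (PySem.List.sorted_perm xs _ _)

lemma length_sdesc (xs : List Int) : (sdesc xs).length = xs.length := by
  simp [sdesc, PySem.List.length_sorted]

lemma sdesc_pairwise (xs : List Int) : (sdesc xs).Pairwise (fun a b => b ≤ a) := by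
  unfold sdesc
  rw [List.pairwise_reverse]
  exact PySem.List.sorted_pairwise xs (fun x => x)

lemma sdesc_eq_of (xs ys : List Int) (h1 : ys.Perm xs) (h2 : ys.Pairwise (fun a b => b ≤ a)) :
    sdesc xs = ys := by
  unfold sdesc
  have := PySem.List.sorted_id_eq_of_perm_of_pairwise xs ys.reverse
    ((List.reverse_perm ys).trans h1) (List.pairwise_reverse.mpr h2)
  rw [this, List.reverse_reverse]

lemma partition_perm (p : Int) (xs : List Int) :
    (xs.filter (fun x => p < x) ++ (List.replicate (xs.count p) p ++ xs.filter (fun x => x < p))).Perm xs := by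
  have h1 := List.filter_append_perm (fun x => decide (p < x)) xs
  have h2 := List.filter_append_perm (fun x => x == p) (xs.filter (fun x => !decide (p < x)))
  rw [List.filter_filter, List.filter_filter] at h2
  have e1 : xs.filter (fun a => (a == p) && !decide (p < a)) = List.replicate (xs.count p) p := by
    rw [← List.filter_beq]
    apply List.filter_congr
    intro a _
    by_cases h : a = p
    · subst h; simp
    · simp [h]
  have e2 : xs.filter (fun a => (!(a == p)) && !decide (p < a)) = xs.filter (fun x => decide (x < p)) := by
    apply List.filter_congr
    intro a _
    by_cases h : a = p
    · subst h; simp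
    · by_cases hpa : p < a
      · simp [hpa]; omega
      · have hlt : a < p := by omega
        simp [h, hpa, hlt]
  rw [e1, e2] at h2
  exact (List.Perm.append_left _ h2).trans h1

lemma sdesc_decomp (p : Int) (xs : List Int) :
    sdesc xs = sdesc (xs.filter (fun x => p < x)) ++
      (List.replicate (xs.count p) p ++ sdesc (xs.filter (fun x => x < p))) := by
  apply sdesc_eq_of
  · refine ((List.Perm.append (sdesc_perm _) (List.Perm.append (List.Perm.refl _) (sdesc_perm _)))).trans ?_
    exact partition_perm p xs
  · rw [List.pairwise_append]
    refine ⟨sdesc_pairwise _, ?_, ?_⟩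
    · rw [List.pairwise_append]
      refine ⟨List.pairwise_replicate.mpr (Or.inr le_rfl), sdesc_pairwise _, ?_⟩
      intro a ha b hb
      have ha' : a = p := List.eq_of_mem_replicate ha
      have hb' : b < p := by
        have := (sdesc_perm _).mem_iff.mp hb
        simpa using List.of_mem_filter this
      omega
    · intro a ha b hb
      have ha' : p < a := by
        have := (sdesc_perm _).mem_iff.mp ha
        simpa using List.of_mem_filter this
      rcases List.mem_append.mp hb with hb | hb
      · have : b = p := List.eq_of_mem_replicate hb
        omega
      · have hb' : b < p := by
          have := (sdesc_perm _).mem_iff.mp hb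
          simpa using List.of_mem_filter this
        omega

lemma topk_eq (n : Nat) : ∀ (xs : List Int), xs.length = n → ∀ (k acc : Int),
    topkLoop xs k acc = acc + ((sdesc xs).take k.toNat).sum := by
  induction n using Nat.strong_induction_on with
  | _ n ih =>
    intro xs hlen k acc
    rw [topkLoop]
    split_ifs with h1 h2
    · simp [Int.toNat_of_nonpos h1]
    · rw [List.take_of_length_le (by rw [length_sdesc]; omega), (sdesc_perm xs).sum_eq]
    · have hne : xs ≠ [] := by intro h; subst h; simp at h2; omega
      have hpm := pivot_mem xs hne
      have hcnt : 0 < xs.count (PySem.List.pyGetD xs (PySem.Int.floordiv (↑xs.length) 2) 0) :=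
        List.count_pos_iff.mpr hpm
      dsimp only
      set p := PySem.List.pyGetD xs (PySem.Int.floordiv (↑xs.length) 2) 0 with hp
      set hi := List.filter (fun x => decide (p < x)) xs with hhi
      set lo := List.filter (fun x => decide (x < p)) xs with hlo
      have hhiL : hi.length < xs.length :=
        List.length_filter_lt_length_iff_exists.mpr ⟨p, hpm, by simp⟩
      have hloL : lo.length < xs.length :=
        List.length_filter_lt_length_iff_exists.mpr ⟨p, hpm, by simp⟩
      have hdec : sdesc xs = sdesc hi ++ (List.replicate (xs.count p) p ++ sdesc lo) := by
        rw [hhi, hlo]; exact sdesc_decomp p xs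
      have hLhi : (sdesc hi).length = hi.length := length_sdesc hi
      split_ifs with h3 h4
      · rw [ih hi.length (by omega) hi rfl k acc, hdec,
          List.take_append_of_le_length (by rw [hLhi]; omega)]
      · rw [hdec, List.take_append, List.take_append,
          List.take_of_length_le (by rw [hLhi]; omega), List.take_replicate,
          show k.toNat - (sdesc hi).length - (List.replicate (xs.count p) p).length = 0 by
            simp only [hLhi, List.length_replicate]; omega,
          List.take_zero]
        have hmin : min (k.toNat - (sdesc hi).length) (xs.count p) = k.toNat - hi.length := by
          simp [hLhi]; omega
        rw [hmin]
        have hc : ((k.toNat - hi.length : Nat) : Int) = k - hi.length := by omega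
        rw [List.sum_append, List.sum_append, List.sum_replicate, List.sum_nil,
          (sdesc_perm hi).sum_eq, nsmul_eq_mul, hc]
        ring
      · rw [ih lo.length (by omega) lo rfl _ _, hdec, List.take_append, List.take_append,
          List.take_of_length_le (l := sdesc hi) (by rw [hLhi]; omega),
          List.take_of_length_le (l := List.replicate (xs.count p) p)
            (by simp only [hLhi, List.length_replicate]; omega),
          show k.toNat - (sdesc hi).length - (List.replicate (xs.count p) p).length
              = (k - ↑hi.length - ↑(xs.count p)).toNat from by
            simp only [hLhi, List.length_replicate]; omega,
          List.sum_append, List.sum_append, List.sum_replicate,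
          (sdesc_perm hi).sum_eq, nsmul_eq_mul]
        ring

lemma map_range_getD (l : List Int) (d : Int) (n : Nat) (h : n ≤ l.length) :
    (List.range n).map (fun i => l.getD i d) = l.take n := by
  apply List.ext_getElem
  · simpa using h
  · intro i h1 h2
    have hi : i < l.length := by simp at h1; omega
    simp [List.getD_eq_getElem?_getD, List.getElem?_eq_getElem hi]

lemma f_alt_eq (L : List Int) (h : 3 ≤ L.length) :
    f_alt L = ((sdesc ((L.drop 1).take (L.length - 2))).take
      ((((L.drop 1).take (L.length - 2)).length + 1) / 2)).sum := by
  unfold f_alt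
  dsimp only
  rw [if_neg (by omega), show ((L.length : Int) - 1) = ((L.length - 1 : Nat) : Int) from by omega,
    show (1 : Int) = ((1 : Nat) : Int) from by norm_num, PySem.List.slice_natCast,
    show L.length - 1 - 1 = L.length - 2 from by omega]
  set M := (L.drop 1).take (L.length - 2) with hM
  rw [show ((M.length : Int) + ((1 : Nat) : Int)) = ((M.length + 1 : Nat) : Int) from by push_cast; ring,
    show PySem.Int.floordiv (((M.length + 1 : Nat) : Int)) 2 = (((M.length + 1) / 2 : Nat) : Int) from by
      exact_mod_cast PySem.Int.floordiv_natCast (M.length + 1) 2,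
    topk_eq M.length M rfl, Int.toNat_natCast, zero_add]

lemma f_eq (a : Int) (t : List Int) (h : 3 ≤ t.length) :
    f (a :: t) = ((sdesc t.dropLast).take ((t.dropLast.length + 1) / 2)).sum := by
  unfold f
  rw [if_neg (by rw [List.length_cons]; omega), if_neg (by rw [List.length_cons]; omega),
    if_neg (by rw [List.length_cons]; omega),
    show (((a :: t).length : Int) - 1) = (((a :: t).length - 1 : Nat) : Int) from by
      simp,
    PySem.List.pop?_natCast _ ((a :: t).length - 1) (by simp),
    ← List.dropLast_eq_eraseIdx (by simp),
    List.dropLast_cons_of_ne_nil (by intro hx; subst hx; simp at h)]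
  dsimp only
  rw [PySem.List.pop?_zero_cons]
  dsimp only
  rw [show ((((PySem.List.sorted t.dropLast (fun x => x)).reverse.length : Int)) + 1)
      = (((PySem.List.sorted t.dropLast (fun x => x)).reverse.length + 1 : Nat) : Int) from by
      push_cast; ring,
    show PySem.Int.floordiv ((((PySem.List.sorted t.dropLast (fun x => x)).reverse.length + 1 : Nat) : Int)) 2
      = ((((PySem.List.sorted t.dropLast (fun x => x)).reverse.length + 1) / 2 : Nat) : Int) from by
      exact_mod_cast PySem.Int.floordiv_natCast _ 2,
    PySem.List.pyRange_zero_nat, PySem.List.foldl_add, zero_add, List.map_map]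
  have hlen : (PySem.List.sorted t.dropLast (fun x => x)).reverse.length = t.dropLast.length := by
    simp [PySem.List.length_sorted]
  have hk : (t.dropLast.length + 1) / 2 ≤ t.dropLast.length := by
    simp [List.length_dropLast]; omega
  rw [hlen]
  have : ((fun i => PySem.List.pyGetD (PySem.List.sorted t.dropLast (fun x => x)).reverse i 0) ∘
      (fun k : Nat => (k : Int))) = fun j : Nat => (PySem.List.sorted t.dropLast (fun x => x)).reverse.getD j 0 := by
    funext j; simp
  rw [this, map_range_getD _ _ _ (by rw [hlen]; exact hk)]
  rfl

-- ===== VERDICT (by name: the statement is the Claim_ definition above) =====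
theorem f_spec : Claim_equal_f := by
  intro L _ hpre
  unfold Spec_f
  obtain ⟨a, t, rfl⟩ := List.exists_cons_of_ne_nil hpre
  by_cases h1 : t.length = 0
  · obtain rfl := List.length_eq_zero_iff.mp h1
    rfl
  by_cases h2 : t.length = 1
  · obtain ⟨b, rfl⟩ := List.length_eq_one_iff.mp h2
    rfl
  by_cases h3 : t.length = 2
  · obtain ⟨b, c, rfl⟩ := List.length_eq_two.mp h3
    rw [f_alt_eq _ (by simp), show f [a, b, c] = b from rfl]
    have hs : sdesc [b] = [b] := sdesc_eq_of [b] [b] (List.Perm.refl _) (by simp)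
    norm_num
    rw [hs]
    simp
  · have h4 : 3 ≤ t.length := by omega
    rw [f_eq a t h4, f_alt_eq _ (by simp; omega)]
    have hM : ((a :: t).drop 1).take ((a :: t).length - 2) = t.dropLast := by
      rw [List.dropLast_eq_take, List.length_cons]
      simp [show t.length + 1 - 2 = t.length - 1 from by omega]
    rw [hM]
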